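-- pv_equiv track=rewrite | github.com/sudarshanvankudre/usaco | Broken Necklace/beads.py | count
-- ===== SOURCE A (Python) =====
-- def count(necklace):
--     """
--     >>> count('bwbrbbr')
--     3
--     >>> count('bbbrrr')
--     3
--     >>> count('wwwrwb')
--     5
--     >>> count('rrwwwwbb')
--     6
--     """
--     beads = 0
--     color = None
--     stop_index = -1
--     for i, b in enumerate(necklace):
--         if not color and b != 'w':
--             color = b
--         elif b != color and b != 'w':
--             stop_index = i
--             break
--         beads += 1
--     return beads, stop_index
-- ===== SOURCE B (Python) =====
-- def count(necklace):
--     color = next((b for b in necklace if b != 'w'), None)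
--     if color is None:
--         return len(necklace), -1
--     for i, b in enumerate(necklace):
--         if b != 'w' and b != color:
--             return i, i
--     return len(necklace), -1
-- ===== Notes on version B (the rewrite author's own statement) =====
-- stated objective: simpler
-- what changed: Replaces A's single state-machine loop (bead counter, optional color, stop index, break) with two separate plain passes: find the anchor color, then find the first conflicting bead; the index itself is the bead count.
import Mathlib
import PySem

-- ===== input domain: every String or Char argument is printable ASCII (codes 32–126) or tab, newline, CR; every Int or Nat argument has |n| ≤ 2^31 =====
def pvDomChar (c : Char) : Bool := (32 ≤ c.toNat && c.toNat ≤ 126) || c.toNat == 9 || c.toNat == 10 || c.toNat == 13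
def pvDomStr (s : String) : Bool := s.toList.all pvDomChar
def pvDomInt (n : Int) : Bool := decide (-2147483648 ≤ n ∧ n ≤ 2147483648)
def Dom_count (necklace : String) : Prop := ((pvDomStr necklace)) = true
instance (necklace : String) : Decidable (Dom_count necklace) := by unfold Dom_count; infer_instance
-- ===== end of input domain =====

-- B replaces A's single merged state-machine loop with two plain passes (find the anchor color, then the first conflict); objective: simpler.

-- ===== PORT A =====
-- 'b != color' with color = None is True in Python
def pyNeOpt (color : Option Char) (b : Char) : Bool :=
  match color with
  | none => true
  | some c => b ≠ c

-- the for-loop of A: state (beads, color, stop_index); i is the enumerate index; 'break' returns immediately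
def countLoopA : List Char → Nat → Int → Option Char → Int → Int × Int
  | [], _, beads, _, stop_index => (beads, stop_index)
  | b :: rest, i, beads, color, stop_index =>
    if color.isNone && b ≠ 'w' then
      countLoopA rest (i + 1) (beads + 1) (some b) stop_index
    else if pyNeOpt color b && b ≠ 'w' then
      (beads, (i : Int))
    else
      countLoopA rest (i + 1) (beads + 1) color stop_index

def count (necklace : String) : Int × Int :=
  countLoopA necklace.toList 0 0 none (-1)

-- ===== PORT B =====
-- second pass: first index i (from enumerate) with b != 'w' and b != color; n = len(necklace)
def conflictLoopB : List Char → Nat → Char → Int → Int × Int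
  | [], _, _, n => (n, -1)
  | b :: rest, i, color, n =>
    if b ≠ 'w' && b ≠ color then ((i : Int), (i : Int))
    else conflictLoopB rest (i + 1) color n

def count_alt (necklace : String) : Int × Int :=
  match necklace.toList.find? (fun b => b ≠ 'w') with
  | none => ((necklace.toList.length : Int), -1)
  | some color => conflictLoopB necklace.toList 0 color (necklace.toList.length : Int)

-- ===== PRECONDITION & SPEC =====
def Spec_count (necklace : String) (out : Int × Int) : Prop := out = count_alt necklace
instance (necklace : String) (out : Int × Int) : Decidable (Spec_count necklace out) := by unfold Spec_count; infer_instance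

-- ===== CLAIM (what is proved, stated in full; the proofs are below) =====
def Claim_equal_count : Prop := ∀ (necklace : String), Dom_count necklace → Spec_count necklace (count necklace)

-- ===== LEMMAS AND PROOFS =====

-- in the some-color phase, beads always equals the current index; A's loop is B's conflict scan
theorem loopA_some (l : List Char) : ∀ (i : Nat) (c : Char),
    countLoopA l i (i : Int) (some c) (-1) = conflictLoopB l i c ((i : Int) + l.length) := by
  induction l with
  | nil => intro i c; simp [countLoopA, conflictLoopB]
  | cons b rest ih =>
    intro i c
    simp only [countLoopA, conflictLoopB, Option.isNone_some, Bool.false_and, pyNeOpt]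
    by_cases hw : b = 'w'
    · simp [hw]
      have := ih (i + 1) c
      push_cast at this ⊢
      rw [show ((i : Int) + 1 + rest.length) = (i : Int) + (rest.length + 1) by ring] at this
      simpa using this
    · by_cases hc : b = c
      · simp [hc]
        have := ih (i + 1) c
        push_cast at this ⊢
        rw [show ((i : Int) + 1 + rest.length) = (i : Int) + (rest.length + 1) by ring] at this
        simpa using this
      · simp [hw, hc]

-- the none-color phase of A equals B's anchor search followed by the conflict scan
theorem loopA_none (l : List Char) : ∀ (i : Nat),
    countLoopA l i (i : Int) none (-1) =
      (match l.find? (fun b => b ≠ 'w') with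
       | none => ((i : Int) + l.length, -1)
       | some color => conflictLoopB l i color ((i : Int) + l.length)) := by
  induction l with
  | nil => intro i; simp [countLoopA, List.find?]
  | cons b rest ih =>
    intro i
    by_cases hw : b = 'w'
    · -- both sides skip a white bead
      simp only [countLoopA, hw, List.find?]
      simp only [Option.isNone_none, Bool.true_and, pyNeOpt]
      simp only [ne_eq, not_true_eq_false, decide_false, if_false,
        Bool.false_eq_true]
      have := ih (i + 1)
      push_cast at this ⊢
      rw [show ((i : Int) + 1 + rest.length) = (i : Int) + (rest.length + 1) by ring] at this
      cases h : rest.find? (fun b => b ≠ 'w') with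
      | none =>
        simp only [h] at this
        simpa [conflictLoopB] using this
      | some c =>
        simp only [h] at this
        rw [this]
        simp [conflictLoopB]
    · -- anchor found: A sets color, B's find? returns b
      have hb : (!decide (b = 'w')) = true := by simpa using hw
      simp only [countLoopA, List.find?, hb, Option.isNone_none, Bool.true_and, ne_eq,
        decide_not]
      have := loopA_some rest (i + 1) b
      push_cast at this ⊢
      rw [show ((i : Int) + 1 + rest.length) = (i : Int) + (rest.length + 1) by ring] at this
      rw [this]
      simp [conflictLoopB, hw]

-- ===== VERDICT (by name: the statement is the Claim_ definition above) =====
theorem count_spec : Claim_equal_count := by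
  intro necklace _
  unfold Spec_count count count_alt
  have := loopA_none necklace.toList 0
  simpa using this
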